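-- pv_equiv track=rewrite | github.com/pytorch/pytorch | .venv311/lib/python3.11/site-packages/sympy/utilities/iterables.py | has_variety
-- ===== SOURCE A (Python) =====
-- def has_variety(seq):
--     """Return True if there are any different elements in ``seq``.
--
--     Examples
--     ========
--
--     >>> from sympy import has_variety
--
--     >>> has_variety((1, 2, 1))
--     True
--     >>> has_variety((1, 1, 1))
--     False
--     """
--     for i, s in enumerate(seq):
--         if i == 0:
--             sentinel = s
--         else:
--             if s != sentinel:
--                 return True
--     return False
-- ===== SOURCE B (Python) =====
-- from itertools import pairwise
--
-- def has_variety(seq):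
--     return any(a != b for a, b in pairwise(seq))
-- ===== Notes on version B (the rewrite author's own statement) =====
-- stated objective: idiomatic
-- what changed: B compares consecutive pairs via itertools.pairwise and any(), maintaining the previous element instead of A's fixed first-element sentinel with an indexed loop.
import Mathlib
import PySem

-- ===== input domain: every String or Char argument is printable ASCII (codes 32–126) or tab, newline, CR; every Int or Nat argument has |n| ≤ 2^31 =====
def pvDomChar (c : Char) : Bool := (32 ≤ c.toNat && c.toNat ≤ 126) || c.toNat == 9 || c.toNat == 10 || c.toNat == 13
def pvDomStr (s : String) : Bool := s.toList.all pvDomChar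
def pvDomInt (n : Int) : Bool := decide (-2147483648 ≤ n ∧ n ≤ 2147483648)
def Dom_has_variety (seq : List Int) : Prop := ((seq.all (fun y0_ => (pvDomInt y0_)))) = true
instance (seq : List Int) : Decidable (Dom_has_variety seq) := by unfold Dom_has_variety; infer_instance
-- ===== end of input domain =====

-- B compares consecutive pairs (itertools.pairwise + any) instead of A's indexed loop with a first-element sentinel; idiomatic restructuring, same O(n) cost.
-- ===== PORT A =====
-- loop body of A: iterate over enumerate(seq); at i == 0 set the sentinel, otherwise return True on s != sentinel
def hvA_loop : List (Int × Int) → Option Int → Bool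
  | [], _ => false
  | (i, s) :: rest, sent =>
    if i = 0 then hvA_loop rest (some s)
    else if (some s ≠ sent : Bool) then true else hvA_loop rest sent

def has_variety (seq : List Int) : Bool :=
  hvA_loop (PySem.List.enumerate seq) none

-- ===== PORT B =====
-- any(a != b for a, b in pairwise(seq)): carry the previous element, stop at the first differing adjacent pair
def hvB_pairs : Int → List Int → Bool
  | _, [] => false
  | a, b :: rest => (a ≠ b : Bool) || hvB_pairs b rest

def has_variety_alt (seq : List Int) : Bool :=
  match seq with
  | [] => false
  | a :: rest => hvB_pairs a rest

-- ===== PRECONDITION & SPEC =====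
def Spec_has_variety (seq : List Int) (out : Bool) : Prop := out = has_variety_alt seq
instance (seq : List Int) (out : Bool) : Decidable (Spec_has_variety seq out) := by unfold Spec_has_variety; infer_instance

-- ===== CLAIM (what is proved, stated in full; the proofs are below) =====
def Claim_equal_has_variety : Prop := ∀ (seq : List Int), Dom_has_variety seq → Spec_has_variety seq (has_variety seq)

-- ===== LEMMAS AND PROOFS =====

-- ===== VERDICT (by name: the statement is the Claim_ definition above) =====
theorem hvA_loop_tail (rest : List Int) (n : Int) (sent : Int) (hn : 0 < n) :
    hvA_loop (PySem.List.enumerate rest n) (some sent) = rest.any (fun s => decide (s ≠ sent)) := by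
  induction rest generalizing n sent with
  | nil => simp [PySem.List.enumerate_nil, hvA_loop]
  | cons b rest ih =>
    rw [PySem.List.enumerate_cons]
    simp only [hvA_loop, if_neg (by omega : ¬ n = 0)]
    by_cases h : b = sent
    · subst h
      rw [ih _ _ (by omega : (0:Int) < n + 1)]
      simp
    · simp [h]

theorem hvB_pairs_eq_any (rest : List Int) (a : Int) :
    hvB_pairs a rest = rest.any (fun s => decide (s ≠ a)) := by
  induction rest generalizing a with
  | nil => simp [hvB_pairs]
  | cons b rest ih =>
    by_cases h : b = a
    · subst h
      simp [hvB_pairs, ih]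
    · simp [hvB_pairs, show a ≠ b from fun e => h e.symm, show b ≠ a from h]

-- ===== VERDICT (by name: the statement is the Claim_ definition above) =====
theorem has_variety_spec : Claim_equal_has_variety := by
  intro seq _
  unfold Spec_has_variety has_variety has_variety_alt
  cases seq with
  | nil => simp [PySem.List.enumerate_nil, hvA_loop]
  | cons a rest =>
    rw [PySem.List.enumerate_cons]
    show _ = hvB_pairs a rest
    rw [hvB_pairs_eq_any]
    rw [show hvA_loop ((0, a) :: PySem.List.enumerate rest (0 + 1)) none
          = hvA_loop (PySem.List.enumerate rest (0 + 1)) (some a) from by simp [hvA_loop]]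
    exact hvA_loop_tail rest (0 + 1) a (by omega)
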